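-- pv_equiv track=rewrite | github.com/femiaiyeku/Algorithm_Exprt_Project | Dynamic_Programming/Squares_Of_Zeroes/solution_1.py | squaresOfZeroes
-- ===== SOURCE A (Python) =====
-- def squaresOfZeroes(matrix):
--     lastIdx = len(matrix) - 1
--     for topRow in range(len(matrix)):
--         for leftCol in range(len(matrix)):
--             squareLength = 2
--             while squareLength <= len(matrix) - topRow and squareLength <= len(matrix) - leftCol:
--                 bottomRow = topRow + squareLength - 1
--                 rightCol = leftCol + squareLength - 1
--                 if isSquareOfZeroes(matrix, topRow, leftCol, bottomRow, rightCol):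
--                     return True
--                 squareLength += 1
--     return False
--
-- def isSquareOfZeroes(matrix, r1, c1, r2, c2):
--     for row in range(r1, r2 + 1):
--         if matrix[row][c1] != 0 or matrix[row][c2] != 0:
--             return False
--     for col in range(c1, c2 + 1):
--         if matrix[r1][col] != 0 or matrix[r2][col] != 0:
--             return False
--     return True
-- ===== SOURCE B (Python) =====
-- def _runs(rows, n):
--     # per row: runs[c] = number of consecutive zeros starting at column c going right
--     out = []
--     for row in rows:
--         runs = [0] * n
--         run = 0
--         for c in range(n - 1, -1, -1):
--             run = run + 1 if row[c] == 0 else 0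
--             runs[c] = run
--         out.append(runs)
--     return out
--
-- def squaresOfZeroes(matrix):
--     n = len(matrix)
--     if n < 2:
--         return False
--     right = _runs(matrix, n)                                            # rightward zero runs
--     downT = _runs([[matrix[r][c] for r in range(n)] for c in range(n)], n)  # downward runs, transposed
--     for top in range(n):
--         for left in range(n):
--             for L in range(2, min(n - top, n - left) + 1):
--                 if (downT[left][top] >= L and downT[left + L - 1][top] >= L
--                         and right[top][left] >= L and right[top + L - 1][left] >= L):
--                     return True
--     return False
-- ===== Notes on version B (the rewrite author's own statement) =====
-- stated objective: faster
-- what changed: B precomputes rightward and downward zero-run-length tables (the downward one as rightward runs of the transpose) so each candidate square border is checked with four O(1) table lookups instead of A's O(L) row/column scans.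
-- outside the precondition, e.g. on squaresOfZeroes([[1, 2], [3]]): A returns False, B raises IndexError
import Mathlib
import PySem

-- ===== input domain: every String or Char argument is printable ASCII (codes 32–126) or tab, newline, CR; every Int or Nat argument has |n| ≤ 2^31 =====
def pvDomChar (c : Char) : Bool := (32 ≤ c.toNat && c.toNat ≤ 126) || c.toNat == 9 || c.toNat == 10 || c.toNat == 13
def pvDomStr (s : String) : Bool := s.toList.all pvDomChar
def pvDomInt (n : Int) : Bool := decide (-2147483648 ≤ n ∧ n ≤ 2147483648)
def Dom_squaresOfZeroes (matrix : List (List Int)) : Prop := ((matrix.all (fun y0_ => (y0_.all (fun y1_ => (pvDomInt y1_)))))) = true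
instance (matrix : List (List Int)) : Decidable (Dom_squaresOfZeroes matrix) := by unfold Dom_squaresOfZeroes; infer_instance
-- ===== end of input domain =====

-- B replaces A's O(L) border re-scans by precomputed zero-run-length tables (O(n^4) → O(n^3));
-- measured faster in a timing run on large inputs.

-- ===== PORT A =====
-- matrix[r][c]; the default 1 (nonzero) is only reached outside Pre_, where Python raises IndexError
def pvCell (matrix : List (List Int)) (r c : Nat) : Int :=
  (matrix.getD r []).getD c 1

def isSquareOfZeroes (matrix : List (List Int)) (r1 c1 r2 c2 : Nat) : Bool :=
  -- early `return False` in a pure scan = short-circuiting `all`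
  ((List.range' r1 (r2 + 1 - r1)).all fun row =>
      decide (pvCell matrix row c1 = 0) && decide (pvCell matrix row c2 = 0)) &&
  ((List.range' c1 (c2 + 1 - c1)).all fun col =>
      decide (pvCell matrix r1 col = 0) && decide (pvCell matrix r2 col = 0))

-- the `while squareLength <= …` loop, squareLength increasing by 1
def aLoop (matrix : List (List Int)) (n top left L : Nat) : Bool :=
  if h : L ≤ n - top ∧ L ≤ n - left then
    if isSquareOfZeroes matrix top left (top + L - 1) (left + L - 1) then true
    else aLoop matrix n top left (L + 1)
  else false
termination_by n - top + 1 - L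
decreasing_by omega

-- A also computes `lastIdx = len(matrix) - 1` but never uses it
def squaresOfZeroes (matrix : List (List Int)) : Bool :=
  let n := matrix.length
  (List.range n).any fun topRow =>
    (List.range n).any fun leftCol =>
      aLoop matrix n topRow leftCol 2

-- ===== PORT B =====
-- the inner `for c in range(n-1,-1,-1)` loop of _runs: builds runs[n-k..n-1] back to front,
-- the carried `run` variable is the head of the list built so far
def runsRowGo (row : List Int) (n : Nat) : Nat → List Nat
  | 0 => []
  | k + 1 =>
    let rest := runsRowGo row n k
    (if row.getD (n - (k + 1)) 1 = 0 then rest.headD 0 + 1 else 0) :: rest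

def runsTable (rows : List (List Int)) (n : Nat) : List (List Nat) :=
  rows.map (fun row => runsRowGo row n n)

-- [[matrix[r][c] for r in range(n)] for c in range(n)]
def transposeN (matrix : List (List Int)) (n : Nat) : List (List Int) :=
  (List.range n).map fun c => (List.range n).map fun r => pvCell matrix r c

def squaresOfZeroes_alt (matrix : List (List Int)) : Bool :=
  let n := matrix.length
  if n < 2 then false
  else
    let right := runsTable matrix n
    let downT := runsTable (transposeN matrix n) n
    (List.range n).any fun top =>
      (List.range n).any fun left =>
        (List.range' 2 (min (n - top) (n - left) - 1)).any fun L =>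
          decide (L ≤ (downT.getD left []).getD top 0) &&
          decide (L ≤ (downT.getD (left + L - 1) []).getD top 0) &&
          decide (L ≤ (right.getD top []).getD left 0) &&
          decide (L ≤ (right.getD (top + L - 1) []).getD left 0)

-- ===== PRECONDITION & SPEC =====
-- Pre_ excludes matrices having a row shorter than the number of rows: on such ragged inputs
-- both Pythons can raise IndexError (and where A happens to return, B raises).
def Pre_squaresOfZeroes (matrix : List (List Int)) : Prop :=
  ∀ row ∈ matrix, matrix.length ≤ row.length
instance (matrix : List (List Int)) : Decidable (Pre_squaresOfZeroes matrix) := by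
  unfold Pre_squaresOfZeroes; infer_instance

def pvWitness_squaresOfZeroes : List (List Int) := [[0, 0], [0, 0]]

def Spec_squaresOfZeroes (matrix : List (List Int)) (out : Bool) : Prop := out = squaresOfZeroes_alt matrix
instance (matrix : List (List Int)) (out : Bool) : Decidable (Spec_squaresOfZeroes matrix out) := by unfold Spec_squaresOfZeroes; infer_instance

-- ===== CLAIM (what is proved, stated in full; the proofs are below) =====
def Claim_equal_squaresOfZeroes : Prop := ∀ (matrix : List (List Int)), Dom_squaresOfZeroes matrix → Pre_squaresOfZeroes matrix → Spec_squaresOfZeroes matrix (squaresOfZeroes matrix)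

-- ===== LEMMAS AND PROOFS =====

-- specification function for a zero-run length starting at column c
def runF (row : List Int) (n c : Nat) : Nat :=
  if _h : c < n then (if row.getD c 1 = 0 then runF row n (c + 1) + 1 else 0) else 0
termination_by n - c

theorem runF_of_ge (row : List Int) (n c : Nat) (h : n ≤ c) : runF row n c = 0 := by
  unfold runF; simp [Nat.not_lt.mpr h]

theorem runsRowGo_eq (row : List Int) (n : Nat) :
    ∀ k, k ≤ n → runsRowGo row n k = (List.range' (n - k) k).map (runF row n) := by
  intro k
  induction k with
  | zero => simp [runsRowGo]
  | succ j ih =>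
    intro hk
    have hx : n - (j + 1) + 1 = n - j := by omega
    have hr : List.range' (n - (j + 1)) (j + 1) = (n - (j + 1)) :: List.range' (n - j) j := by
      rw [List.range'_succ, hx]
    rw [runsRowGo, ih (by omega), hr, List.map_cons]
    congr 1
    have hlt : n - (j + 1) < n := by omega
    rw [runF]
    simp only [hlt, dif_pos]
    have hhead : (List.map (runF row n) (List.range' (n - j) j)).headD 0 = runF row n (n - (j + 1) + 1) := by
      cases j with
      | zero => simp [runF_of_ge row n n (le_refl n), show n - (0+1) + 1 = n by omega]
      | succ i =>
        rw [List.range'_succ, List.map_cons, List.headD_cons]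
        congr 1
        omega
    rw [hhead]

theorem runF_ge_iff (row : List Int) (n : Nat) :
    ∀ L c, c ≤ n →
      (L ≤ runF row n c ↔ c + L ≤ n ∧ ∀ i < L, row.getD (c + i) 1 = 0) := by
  intro L
  induction L with
  | zero =>
    intro c hc
    simp only [Nat.zero_le, true_iff, Nat.add_zero]
    exact ⟨hc, fun i hi => absurd hi (Nat.not_lt_zero i)⟩
  | succ J ih =>
    intro c hc
    rw [runF]
    by_cases hcn : c < n
    · simp only [hcn, dif_pos]
      by_cases hz : row.getD c 1 = 0
      · simp only [hz, if_pos]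
        rw [Nat.succ_le_succ_iff, ih (c + 1) (by omega)]
        constructor
        · rintro ⟨h1, h2⟩
          refine ⟨by omega, ?_⟩
          intro i hi
          cases i with
          | zero => simpa using hz
          | succ m =>
            have hm := h2 m (by omega)
            rw [show c + (m + 1) = c + 1 + m from by omega]
            exact hm
        · rintro ⟨h1, h2⟩
          refine ⟨by omega, ?_⟩
          intro i hi
          have := h2 (i + 1) (by omega)
          simpa [show c + (i+1) = c + 1 + i by omega] using this
      · simp only [hz, if_neg, not_false_iff]
        constructor
        · omega
        · rintro ⟨h1, h2⟩
          exact absurd (by simpa using h2 0 (by omega)) hz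
    · simp only [hcn, dif_neg, not_false_iff]
      constructor
      · omega
      · rintro ⟨h1, h2⟩; omega

theorem runsTable_getD (rows : List (List Int)) (n r c : Nat)
    (hr : r < rows.length) (hc : c < n) :
    ((runsTable rows n).getD r []).getD c 0 = runF (rows.getD r []) n c := by
  have h1 : (runsTable rows n).getD r [] = runsRowGo (rows.getD r []) n n := by
    rw [runsTable, List.getD_eq_getElem _ _ (by simpa using hr), List.getElem_map,
        List.getD_eq_getElem _ _ hr]
  rw [h1, runsRowGo_eq _ _ n (le_refl n)]
  have hlen : ((List.range' (n - n) n).map (runF (rows.getD r []) n)).length = n := by simp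
  rw [List.getD_eq_getElem _ _ (by omega), List.getElem_map, List.getElem_range']
  congr 1
  omega

theorem transposeN_getD (matrix : List (List Int)) (n c r : Nat) (hc : c < n) (hr : r < n) :
    ((transposeN matrix n).getD c []).getD r 1 = pvCell matrix r c := by
  have h1 : (transposeN matrix n).getD c [] = (List.range n).map (fun r => pvCell matrix r c) := by
    rw [transposeN, List.getD_eq_getElem _ _ (by simpa using hc), List.getElem_map,
        List.getElem_range]
  rw [h1, List.getD_eq_getElem _ _ (by simpa using hr), List.getElem_map, List.getElem_range]

theorem any_congr_mem {α : Type} (l : List α) (f g : α → Bool)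
    (h : ∀ x ∈ l, f x = g x) : l.any f = l.any g := by
  induction l with
  | nil => rfl
  | cons a t ih => simp only [List.any_cons, h a (by simp), ih (fun x hx => h x (by simp [hx]))]

theorem aLoop_eq_range (matrix : List (List Int)) (n top left : Nat) :
    ∀ L, aLoop matrix n top left L =
      (List.range' L (min (n - top) (n - left) + 1 - L)).any
        (fun l => isSquareOfZeroes matrix top left (top + l - 1) (left + l - 1)) := by
  suffices H : ∀ k L, min (n - top) (n - left) + 1 - L = k →
      aLoop matrix n top left L =
        (List.range' L (min (n - top) (n - left) + 1 - L)).any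
          (fun l => isSquareOfZeroes matrix top left (top + l - 1) (left + l - 1)) by
    intro L; exact H _ L rfl
  intro k
  induction k with
  | zero =>
    intro L hk
    rw [aLoop, dif_neg (by omega), hk, List.range'_zero, List.any_nil]
  | succ j ih =>
    intro L hk
    have hLm : L ≤ min (n - top) (n - left) := by omega
    have hcount : min (n - top) (n - left) + 1 - L = j + 1 := hk
    rw [aLoop, dif_pos ⟨by omega, by omega⟩, hcount, List.range'_succ, List.any_cons]
    by_cases hs : isSquareOfZeroes matrix top left (top + L - 1) (left + L - 1) = true
    · simp [hs]
    · simp only [Bool.not_eq_true] at hs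
      rw [if_neg (by simp [hs]), hs, Bool.false_or, ih (L + 1) (by omega),
        show min (n - top) (n - left) + 1 - (L + 1) = j from by omega]

-- the heart: for 2 ≤ L ≤ min(n-top, n-left), A's border scan equals B's four run-table lookups
theorem cond_eq (matrix : List (List Int)) (top left L : Nat)
    (hL2 : 2 ≤ L) (hLt : L ≤ matrix.length - top) (hLl : L ≤ matrix.length - left) :
    isSquareOfZeroes matrix top left (top + L - 1) (left + L - 1) =
      (decide (L ≤ ((runsTable (transposeN matrix matrix.length) matrix.length).getD left []).getD top 0) &&
       decide (L ≤ ((runsTable (transposeN matrix matrix.length) matrix.length).getD (left + L - 1) []).getD top 0) &&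
       decide (L ≤ ((runsTable matrix matrix.length).getD top []).getD left 0) &&
       decide (L ≤ ((runsTable matrix matrix.length).getD (top + L - 1) []).getD left 0)) := by
  have htop : top + L ≤ matrix.length := by omega
  have hleft : left + L ≤ matrix.length := by omega
  have hTlen : (transposeN matrix matrix.length).length = matrix.length := by
    simp [transposeN]
  have h1 : top + L - 1 + 1 - top = L := by omega
  have h2 : left + L - 1 + 1 - left = L := by omega
  have e1 := runsTable_getD (transposeN matrix matrix.length) matrix.length left top
    (by rw [hTlen]; omega) (by omega)
  have e2 := runsTable_getD (transposeN matrix matrix.length) matrix.length (left + L - 1) top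
    (by rw [hTlen]; omega) (by omega)
  have e3 := runsTable_getD matrix matrix.length top left (by omega) (by omega)
  have e4 := runsTable_getD matrix matrix.length (top + L - 1) left (by omega) (by omega)
  rw [Bool.eq_iff_iff]
  simp only [isSquareOfZeroes, Bool.and_eq_true, List.all_eq_true, List.mem_range'_1,
    decide_eq_true_eq, h1, h2, e1, e2, e3, e4, and_assoc]
  rw [runF_ge_iff _ matrix.length L top (by omega),
      runF_ge_iff _ matrix.length L top (by omega),
      runF_ge_iff _ matrix.length L left (by omega),
      runF_ge_iff _ matrix.length L left (by omega)]
  constructor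
  · rintro ⟨hrows, hcols⟩
    refine ⟨⟨by omega, ?_⟩, ⟨by omega, ?_⟩, ⟨by omega, ?_⟩, by omega, ?_⟩
    · intro i hi
      rw [transposeN_getD matrix matrix.length left (top + i) (by omega) (by omega)]
      exact (hrows (top + i) ⟨by omega, by omega⟩).1
    · intro i hi
      rw [transposeN_getD matrix matrix.length (left + L - 1) (top + i) (by omega) (by omega)]
      exact (hrows (top + i) ⟨by omega, by omega⟩).2
    · intro i hi
      exact (hcols (left + i) ⟨by omega, by omega⟩).1
    · intro i hi
      exact (hcols (left + i) ⟨by omega, by omega⟩).2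
  · rintro ⟨⟨-, hA⟩, ⟨-, hB⟩, ⟨-, hC⟩, -, hD⟩
    constructor
    · intro r hr
      have hAi := hA (r - top) (by omega)
      have hBi := hB (r - top) (by omega)
      rw [transposeN_getD matrix matrix.length left (top + (r - top)) (by omega) (by omega)]
        at hAi
      rw [transposeN_getD matrix matrix.length (left + L - 1) (top + (r - top)) (by omega)
        (by omega)] at hBi
      have hrr : top + (r - top) = r := by omega
      rw [hrr] at hAi hBi
      exact ⟨hAi, hBi⟩
    · intro c hc
      have hCi := hC (c - left) (by omega)
      have hDi := hD (c - left) (by omega)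
      have hcc : left + (c - left) = c := by omega
      rw [hcc] at hCi hDi
      exact ⟨hCi, hDi⟩

theorem main_eq (matrix : List (List Int)) :
    squaresOfZeroes matrix = squaresOfZeroes_alt matrix := by
  simp only [squaresOfZeroes, squaresOfZeroes_alt]
  by_cases hlt : matrix.length < 2
  · rw [if_pos hlt, List.any_eq_false]
    intro top htop
    simp only [Bool.not_eq_true]
    rw [List.any_eq_false]
    intro left hleft
    simp only [Bool.not_eq_true]
    rw [aLoop_eq_range]
    have hz : min (matrix.length - top) (matrix.length - left) + 1 - 2 = 0 := by
      have := List.mem_range.mp htop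
      omega
    rw [hz, List.range'_zero]
    simp
  · rw [if_neg hlt]
    apply any_congr_mem
    intro top htop
    apply any_congr_mem
    intro left hleft
    have htn := List.mem_range.mp htop
    have hln := List.mem_range.mp hleft
    rw [aLoop_eq_range]
    have hc : min (matrix.length - top) (matrix.length - left) + 1 - 2 =
        min (matrix.length - top) (matrix.length - left) - 1 := by omega
    rw [hc]
    apply any_congr_mem
    intro L hL
    have hmem := List.mem_range'_1.mp hL
    exact cond_eq matrix top left L (by omega) (by omega) (by omega)

-- ===== VERDICT (by name: the statement is the Claim_ definition above) =====
theorem squaresOfZeroes_spec : Claim_equal_squaresOfZeroes := by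
  intro matrix _ _
  unfold Spec_squaresOfZeroes
  exact main_eq matrix
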